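-- pv_equiv track=rewrite | github.com/browndw/morph_parser | morph_parser/prep/audit_orthography.py | _is_vowel_coalescence
-- ===== SOURCE A (Python) =====
-- from typing import Dict, Iterable, List, Optional
--
-- VOWELS = set("aeiou")
--
-- def _is_vowel_coalescence(
--
--     diff_ops: Iterable[tuple],
--     boundaries: List[int],
--     segments_lower: List[str],
--     joined_lower: str,
--     word_lower: str,
-- ) -> bool:
--     for op, j1, j2, _, _ in diff_ops:
--         if op != "delete":
--             continue
--         deleted = joined_lower[j1:j2]
--         if len(deleted) != 1 or deleted not in VOWELS:
--             continue
--         boundary_idx = None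
--         for idx, boundary in enumerate(boundaries[:-1]):
--             if j1 == boundary:
--                 boundary_idx = idx
--                 break
--         if boundary_idx is None:
--             continue
--         prev_idx = boundary_idx
--         suffix_idx = boundary_idx + 1
--         if prev_idx < 0 or suffix_idx >= len(segments_lower):
--             continue
--         prev_seg = segments_lower[prev_idx]
--         suffix_seg = segments_lower[suffix_idx]
--         if not prev_seg.endswith(deleted):
--             continue
--         if not suffix_seg.startswith(deleted):
--             continue
--         return True
--     return False
-- ===== SOURCE B (Python) =====
-- VOWELS = set("aeiou")
--
-- def _is_vowel_coalescence(diff_ops, boundaries, segments_lower, joined_lower, word_lower):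
--     # Index the single-vowel deletions once: start offset -> deleted vowel.
--     vowel_del_at = {}
--     for op, j1, j2, _, _ in diff_ops:
--         if op != "delete":
--             continue
--         deleted = joined_lower[j1:j2]
--         if len(deleted) == 1 and deleted in VOWELS:
--             vowel_del_at[j1] = deleted
--     # Scan the boundaries (all but the last), first occurrence of each position only.
--     seen = set()
--     for idx, boundary in enumerate(boundaries[:-1]):
--         if boundary in seen:
--             continue
--         seen.add(boundary)
--         deleted = vowel_del_at.get(boundary)
--         if deleted is None:
--             continue
--         if idx + 1 >= len(segments_lower):
--             continue
--         if segments_lower[idx].endswith(deleted) and segments_lower[idx + 1].startswith(deleted):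
--             return True
--     return False
-- ===== Notes on version B (the rewrite author's own statement) =====
-- stated objective: alternative
-- what changed: Instead of rescanning boundaries[:-1] inside the loop over diff ops, B builds a hash index of single-vowel deletions (j1 -> vowel) in one pass over diff_ops and then makes one pass over enumerate(boundaries[:-1]) (first occurrence of each boundary value only), looking each boundary up in the index.
import Mathlib
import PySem

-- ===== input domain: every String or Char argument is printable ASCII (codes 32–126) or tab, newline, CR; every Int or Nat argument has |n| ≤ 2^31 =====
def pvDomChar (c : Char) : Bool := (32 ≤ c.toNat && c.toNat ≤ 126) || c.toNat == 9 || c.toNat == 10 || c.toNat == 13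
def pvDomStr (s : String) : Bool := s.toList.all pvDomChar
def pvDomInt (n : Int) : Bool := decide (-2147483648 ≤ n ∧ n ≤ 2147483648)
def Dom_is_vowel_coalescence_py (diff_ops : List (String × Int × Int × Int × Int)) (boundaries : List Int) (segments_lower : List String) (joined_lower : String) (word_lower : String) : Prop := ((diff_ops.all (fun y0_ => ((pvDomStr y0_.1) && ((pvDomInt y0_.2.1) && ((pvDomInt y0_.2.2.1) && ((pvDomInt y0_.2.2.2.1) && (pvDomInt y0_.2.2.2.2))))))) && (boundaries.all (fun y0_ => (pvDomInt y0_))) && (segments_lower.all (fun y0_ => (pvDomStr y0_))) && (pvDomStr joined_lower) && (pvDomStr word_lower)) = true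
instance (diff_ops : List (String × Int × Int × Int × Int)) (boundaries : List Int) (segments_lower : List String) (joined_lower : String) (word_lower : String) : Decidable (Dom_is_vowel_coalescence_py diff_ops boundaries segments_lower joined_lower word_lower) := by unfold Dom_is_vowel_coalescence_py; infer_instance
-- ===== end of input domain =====

-- ===== PORT A =====
-- Header: B replaces A's nested scan (each qualifying delete op rescans boundaries[:-1]) by a
-- vowel-deletion index built once over diff_ops plus a single scan of enumerate(boundaries[:-1])
-- with a seen-set, inverting the loop nesting; objective: alternative (same result, reshaped traversal).

def pvVOWELS : PySem.Set String := PySem.Set.ofList ["a", "e", "i", "o", "u"]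

-- inner loop: 'for idx, boundary in enumerate(boundaries[:-1]): if j1 == boundary: boundary_idx = idx; break'
def pvA_findBoundary (j1 : Int) : List (Int × Int) → Option Int
  | [] => none
  | (idx, boundary) :: rest => if j1 == boundary then some idx else pvA_findBoundary j1 rest

def pvA_loop (boundaries : List Int) (segments_lower : List String) (joined_lower : String) :
    List (String × Int × Int × Int × Int) → Bool
  | [] => false
  | (op, j1, j2, _, _) :: rest =>
    if op != "delete" then pvA_loop boundaries segments_lower joined_lower rest else
    let deleted := PySem.Str.slice joined_lower (some j1) (some j2)
    if PySem.Str.len deleted != 1 || !(PySem.Set.contains pvVOWELS deleted) then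
      pvA_loop boundaries segments_lower joined_lower rest
    else
      match pvA_findBoundary j1 (PySem.List.enumerate (PySem.List.slice boundaries none (some (-1))) 0) with
      | none => pvA_loop boundaries segments_lower joined_lower rest
      | some boundary_idx =>
        let prev_idx := boundary_idx
        let suffix_idx := boundary_idx + 1
        if prev_idx < 0 || suffix_idx ≥ (segments_lower.length : Int) then
          pvA_loop boundaries segments_lower joined_lower rest
        else
          let prev_seg := PySem.List.pyGetD segments_lower prev_idx ""
          let suffix_seg := PySem.List.pyGetD segments_lower suffix_idx ""
          if !(PySem.Str.endswith prev_seg deleted) then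
            pvA_loop boundaries segments_lower joined_lower rest
          else if !(PySem.Str.startswith suffix_seg deleted) then
            pvA_loop boundaries segments_lower joined_lower rest
          else true

def is_vowel_coalescence_py (diff_ops : List (String × Int × Int × Int × Int)) (boundaries : List Int) (segments_lower : List String) (joined_lower : String) (word_lower : String) : Bool :=
  pvA_loop boundaries segments_lower joined_lower diff_ops

-- ===== PORT B =====
-- B: index the single-vowel deletions once (j1 -> deleted vowel) …
def pvB_vowelIndex (joined_lower : String) (diff_ops : List (String × Int × Int × Int × Int)) :
    PySem.Dict Int String :=
  diff_ops.foldl (fun d t =>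
    match t with
    | (op, j1, j2, _, _) =>
      if op != "delete" then d else
      let deleted := PySem.Str.slice joined_lower (some j1) (some j2)
      if PySem.Str.len deleted == 1 && PySem.Set.contains pvVOWELS deleted then
        d.insert j1 deleted
      else d) PySem.Dict.empty

-- … then scan enumerate(boundaries[:-1]), first occurrence of each position only
def pvB_scan (vd : PySem.Dict Int String) (segments_lower : List String) :
    PySem.Set Int → List (Int × Int) → Bool
  | _, [] => false
  | seen, (idx, boundary) :: rest =>
    if PySem.Set.contains seen boundary then pvB_scan vd segments_lower seen rest else
    let seen' := PySem.Set.add seen boundary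
    match vd.get? boundary with
    | none => pvB_scan vd segments_lower seen' rest
    | some deleted =>
      if idx + 1 ≥ (segments_lower.length : Int) then pvB_scan vd segments_lower seen' rest
      else if PySem.Str.endswith (PySem.List.pyGetD segments_lower idx "") deleted
             && PySem.Str.startswith (PySem.List.pyGetD segments_lower (idx + 1) "") deleted then
        true
      else pvB_scan vd segments_lower seen' rest

def is_vowel_coalescence_py_alt (diff_ops : List (String × Int × Int × Int × Int)) (boundaries : List Int) (segments_lower : List String) (joined_lower : String) (word_lower : String) : Bool :=
  pvB_scan (pvB_vowelIndex joined_lower diff_ops) segments_lower PySem.Set.empty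
    (PySem.List.enumerate (PySem.List.slice boundaries none (some (-1))) 0)

-- ===== PRECONDITION & SPEC =====
def Spec_is_vowel_coalescence_py (diff_ops : List (String × Int × Int × Int × Int)) (boundaries : List Int) (segments_lower : List String) (joined_lower : String) (word_lower : String) (out : Bool) : Prop := out = is_vowel_coalescence_py_alt diff_ops boundaries segments_lower joined_lower word_lower
instance (diff_ops : List (String × Int × Int × Int × Int)) (boundaries : List Int) (segments_lower : List String) (joined_lower : String) (word_lower : String) (out : Bool) : Decidable (Spec_is_vowel_coalescence_py diff_ops boundaries segments_lower joined_lower word_lower out) := by unfold Spec_is_vowel_coalescence_py; infer_instance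

-- ===== CLAIM (what is proved, stated in full; the proofs are below) =====
def Claim_equal_is_vowel_coalescence_py : Prop := ∀ (diff_ops : List (String × Int × Int × Int × Int)) (boundaries : List Int) (segments_lower : List String) (joined_lower : String) (word_lower : String), Dom_is_vowel_coalescence_py diff_ops boundaries segments_lower joined_lower word_lower → Spec_is_vowel_coalescence_py diff_ops boundaries segments_lower joined_lower word_lower (is_vowel_coalescence_py diff_ops boundaries segments_lower joined_lower word_lower)

-- ===== LEMMAS AND PROOFS =====

-- proof-side abbreviations
def pvDel (joined : String) (j1 j2 : Int) : String := PySem.Str.slice joined (some j1) (some j2)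

def pvQual (joined : String) (t : String × Int × Int × Int × Int) : Bool :=
  t.1 == "delete" &&
    (PySem.Str.len (pvDel joined t.2.1 t.2.2.1) == 1 &&
     PySem.Set.contains pvVOWELS (pvDel joined t.2.1 t.2.2.1))

def pvPassAt (segs : List String) (v : String) (idx : Int) : Bool :=
  !(idx + 1 ≥ (segs.length : Int)) &&
  (PySem.Str.endswith (PySem.List.pyGetD segs idx "") v &&
   PySem.Str.startswith (PySem.List.pyGetD segs (idx + 1) "") v)

def pvPass (E : List (Int × Int)) (segs : List String) (k : Int) (v : String) : Bool :=
  match pvA_findBoundary k E with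
  | none => false
  | some idx => !(idx < 0 || idx + 1 ≥ (segs.length : Int)) &&
      (PySem.Str.endswith (PySem.List.pyGetD segs idx "") v &&
       PySem.Str.startswith (PySem.List.pyGetD segs (idx + 1) "") v)

-- a length-1 slice from start j1 is determined by j1 alone
theorem pvTake_len_one {γ : Type} (l : List γ) (t : Nat) (h : (l.take t).length = 1) :
    l.take t = l.take 1 := by
  cases l with
  | nil => simp at h
  | cons x xs =>
    cases t with
    | zero => simp at h
    | succ t => simp_all [List.take_succ_cons, List.length_eq_zero_iff]

theorem pvDel_det (joined : String) (j1 j2 j2' : Int)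
    (h : PySem.Str.len (pvDel joined j1 j2) = 1)
    (h' : PySem.Str.len (pvDel joined j1 j2') = 1) :
    pvDel joined j1 j2 = pvDel joined j1 j2' := by
  simp only [pvDel, PySem.Str.slice, PySem.Chars.slice, PySem.Str.len_eq, String.toList_ofList] at *
  simp only [PySem.List.slice] at *
  have h2 : (List.take (PySem.List.clampIdx joined.toList.length j2 - PySem.List.clampIdx joined.toList.length j1) (List.drop (PySem.List.clampIdx joined.toList.length j1) joined.toList)).length = 1 := by exact_mod_cast h
  have h2' : (List.take (PySem.List.clampIdx joined.toList.length j2' - PySem.List.clampIdx joined.toList.length j1) (List.drop (PySem.List.clampIdx joined.toList.length j1) joined.toList)).length = 1 := by exact_mod_cast h'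
  congr 1
  rw [pvTake_len_one _ _ h2, pvTake_len_one _ _ h2']

theorem pvFind_enum_ge (k : Int) (l : List Int) : ∀ (s idx : Int),
    pvA_findBoundary k (PySem.List.enumerate l s) = some idx → s ≤ idx := by
  induction l with
  | nil => intro s idx h; simp [PySem.List.enumerate, pvA_findBoundary] at h
  | cons b rest ih =>
    intro s idx h
    rw [PySem.List.enumerate_cons] at h
    simp only [pvA_findBoundary] at h
    split at h
    · simp at h; omega
    · have := ih (s+1) idx h; omega

-- A computes 'any qualifying op passes at the first boundary occurrence of its offset'
theorem pvA_char (bnds : List Int) (segs : List String) (joined : String)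
    (ops : List (String × Int × Int × Int × Int)) :
    pvA_loop bnds segs joined ops =
      ops.any (fun t => pvQual joined t &&
        pvPass (PySem.List.enumerate (PySem.List.slice bnds none (some (-1))) 0) segs
          t.2.1 (pvDel joined t.2.1 t.2.2.1)) := by
  induction ops with
  | nil => simp [pvA_loop]
  | cons t rest ih =>
    obtain ⟨op, j1, j2, x, y⟩ := t
    rw [List.any_cons, ← ih]
    by_cases h1 : op = "delete"
    · subst h1
      by_cases h2a : PySem.Str.len (PySem.Str.slice joined (some j1) (some j2)) = 1
      · by_cases h2b : PySem.Set.contains pvVOWELS (PySem.Str.slice joined (some j1) (some j2)) = true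
        · have h2a' : (PySem.List.slice joined.toList (some j1) (some j2)).length = 1 := by
            have h := h2a
            simp only [PySem.Str.len_eq, PySem.Str.slice, PySem.Chars.slice,
              String.toList_ofList] at h
            exact_mod_cast h
          have h2b' : PySem.Str.slice joined (some j1) (some j2) ∈ pvVOWELS := by
            simpa [PySem.Set.contains] using h2b
          cases hf : pvA_findBoundary j1
              (PySem.List.enumerate (PySem.List.slice bnds none (some (-1))) 0) with
          | none => simp [pvA_loop, pvQual, pvPass, pvDel, h2a, h2b, hf]
          | some idx =>
            by_cases h3 : idx < 0 ∨ idx + 1 ≥ (segs.length : Int)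
            · rcases h3 with h3 | h3
              · simp [pvA_loop, pvQual, pvPass, pvDel, hf, h3]
              · simp [pvA_loop, pvQual, pvPass, pvDel, hf, h3]
            · push_neg at h3
              have h3a : ¬ (idx < 0) := by omega
              have h3b : ¬ ((segs.length : Int) ≤ idx + 1) := by omega
              by_cases h4 : PySem.Str.endswith (PySem.List.pyGetD segs idx "")
                  (PySem.Str.slice joined (some j1) (some j2)) = true
              · have h4' := h4
                simp only [PySem.Str.endswith_eq, PySem.Str.slice, String.toList_ofList,
                  PySem.Chars.slice] at h4'
                by_cases h5 : PySem.Str.startswith (PySem.List.pyGetD segs (idx + 1) "")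
                    (PySem.Str.slice joined (some j1) (some j2)) = true
                · have h5' := h5
                  simp only [PySem.Str.startswith_eq, PySem.Str.slice, String.toList_ofList,
                    PySem.Chars.slice] at h5'
                  simp [pvA_loop, pvQual, pvPass, pvDel, hf, h2a', h2b', h3a, h3b, h4', h5']
                · have h5' : PySem.Chars.startswith (PySem.List.pyGetD segs (idx + 1) "").toList
                      (PySem.List.slice joined.toList (some j1) (some j2)) = false := by
                    simp only [Bool.not_eq_true] at h5
                    simpa [PySem.Str.startswith_eq, PySem.Str.slice, String.toList_ofList,
                      PySem.Chars.slice] using h5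
                  simp [pvA_loop, pvQual, pvPass, pvDel, hf, h3a, h3b, h5']
              · have h4' : PySem.Chars.endswith (PySem.List.pyGetD segs idx "").toList
                    (PySem.List.slice joined.toList (some j1) (some j2)) = false := by
                  simp only [Bool.not_eq_true] at h4
                  simpa [PySem.Str.endswith_eq, PySem.Str.slice, String.toList_ofList,
                    PySem.Chars.slice] using h4
                simp [pvA_loop, pvQual, pvPass, pvDel, hf, h3a, h3b, h4']
        · have h2b' : PySem.Str.slice joined (some j1) (some j2) ∉ pvVOWELS := by
            simpa [PySem.Set.contains] using h2b
          simp [pvA_loop, pvQual, pvPass, pvDel, h2b']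
      · have h2a' : ¬ (PySem.List.slice joined.toList (some j1) (some j2)).length = 1 := by
          intro hl
          apply h2a
          simp [PySem.Str.len_eq, PySem.Str.slice, PySem.Chars.slice, String.toList_ofList, hl]
        have h2an : ¬ (((PySem.List.slice joined.toList (some j1) (some j2)).length : Int) = 1) := by
          exact_mod_cast h2a'
        simp [pvA_loop, pvQual, pvPass, pvDel, h2a', h2an]
    · simp [pvA_loop, pvQual, pvPass, pvDel, h1]

-- the vowel-deletion index
def pvStep (joined : String) (d : PySem.Dict Int String)
    (t : String × Int × Int × Int × Int) : PySem.Dict Int String :=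
  match t with
  | (op, j1, j2, _, _) =>
    if op != "delete" then d else
    let deleted := PySem.Str.slice joined (some j1) (some j2)
    if PySem.Str.len deleted == 1 && PySem.Set.contains pvVOWELS deleted then
      d.insert j1 deleted
    else d

def pvIndexAux (joined : String) (d0 : PySem.Dict Int String)
    (ops : List (String × Int × Int × Int × Int)) : PySem.Dict Int String :=
  ops.foldl (pvStep joined) d0

theorem pvIndexAux_cons (joined : String) (d0 : PySem.Dict Int String) (t : String × Int × Int × Int × Int)
    (rest : List (String × Int × Int × Int × Int)) :
    pvIndexAux joined d0 (t :: rest) = pvIndexAux joined (pvStep joined d0 t) rest := rfl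

theorem pvIndexAux_eq (joined : String) (ops : List (String × Int × Int × Int × Int)) :
    pvB_vowelIndex joined ops = pvIndexAux joined PySem.Dict.empty ops := rfl

theorem pvIndex_sound (joined : String) (ops : List (String × Int × Int × Int × Int)) :
    ∀ (d0 : PySem.Dict Int String) (k : Int) (v : String),
      (pvIndexAux joined d0 ops).get? k = some v →
      (∃ t ∈ ops, pvQual joined t = true ∧ t.2.1 = k ∧ pvDel joined t.2.1 t.2.2.1 = v) ∨
        d0.get? k = some v := by
  induction ops with
  | nil => intro d0 k v h; right; simpa [pvIndexAux] using h
  | cons t rest ih =>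
    intro d0 k v h
    rw [pvIndexAux_cons] at h
    rcases ih _ k v h with ⟨t', ht', rest'⟩ | hbase
    · exact Or.inl ⟨t', List.mem_cons_of_mem _ ht', rest'⟩
    · obtain ⟨op, j1, j2, x, y⟩ := t
      by_cases h1 : op = "delete"
      · subst h1
        simp only [pvStep, bne_self_eq_false, Bool.false_eq_true, if_false] at hbase
        split at hbase
        · rename_i h2
          rw [PySem.Dict.get?_insert] at hbase
          by_cases hk : k = j1
          · left
            refine ⟨("delete", j1, j2, x, y), List.mem_cons_self, ?_, hk.symm, ?_⟩
            · simp only [pvQual, pvDel]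
              simpa using h2
            · simp only [pvDel]
              simpa [hk] using hbase
          · right; simpa [hk] using hbase
        · right; exact hbase
      · right; simpa [pvStep, h1] using hbase

theorem pvIndex_mono (joined : String) (ops : List (String × Int × Int × Int × Int)) :
    ∀ (d0 : PySem.Dict Int String) (k : Int),
      (∃ v, d0.get? k = some v) → ∃ v', (pvIndexAux joined d0 ops).get? k = some v' := by
  induction ops with
  | nil => intro d0 k h; simpa [pvIndexAux] using h
  | cons t rest ih =>
    intro d0 k h
    rw [pvIndexAux_cons]
    apply ih
    obtain ⟨op, j1, j2, x, y⟩ := t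
    obtain ⟨v, hv⟩ := h
    simp only [pvStep]
    split
    · exact ⟨v, hv⟩
    · split
      · rw [PySem.Dict.get?_insert]
        by_cases hk : k = j1
        · exact ⟨PySem.Str.slice joined (some j1) (some j2), by simp [hk]⟩
        · exact ⟨v, by simp [hk, hv]⟩
      · exact ⟨v, hv⟩

theorem pvIndex_complete (joined : String) (ops : List (String × Int × Int × Int × Int)) :
    ∀ (d0 : PySem.Dict Int String) (k : Int),
      (∃ t ∈ ops, pvQual joined t = true ∧ t.2.1 = k) →
      ∃ v, (pvIndexAux joined d0 ops).get? k = some v := by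
  induction ops with
  | nil => rintro d0 k ⟨t, ht, _⟩; simp at ht
  | cons t rest ih =>
    rintro d0 k ⟨t', ht', hq, hk⟩
    rw [pvIndexAux_cons]
    rcases List.mem_cons.mp ht' with rfl | hmem
    · apply pvIndex_mono
      obtain ⟨op, j1, j2, x, y⟩ := t'
      simp only [pvQual] at hq
      obtain ⟨hop, hrest⟩ := Bool.and_eq_true_iff.mp hq
      have hop' : op = "delete" := by simpa using hop
      subst hop'
      simp only at hk
      subst hk
      simp only [pvStep, pvDel] at hrest ⊢
      simp only [bne_self_eq_false, Bool.false_eq_true, if_false, hrest, if_true]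
      exact ⟨PySem.Str.slice joined (some j1) (some j2), by rw [PySem.Dict.get?_insert]; simp⟩
    · exact ih _ k ⟨t', hmem, hq, hk⟩

theorem pvContains_add (s : PySem.Set Int) (x y : Int) :
    PySem.Set.contains (PySem.Set.add s x) y = (PySem.Set.contains s y || y == x) := by
  by_cases hy : y = x
  · subst hy
    by_cases hx : y ∈ s
    · simp [PySem.Set.add, PySem.Set.contains, hx]
    · simp [PySem.Set.add, PySem.Set.contains, hx]
  · by_cases hx : x ∈ s
    · simp [PySem.Set.add, PySem.Set.contains, hx, hy]
    · simp [PySem.Set.add, PySem.Set.contains, hx, hy]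

-- B's scan finds a passing first occurrence
theorem pvB_char (vd : PySem.Dict Int String) (segs : List String) :
    ∀ (l : List (Int × Int)) (seen : PySem.Set Int),
      pvB_scan vd segs seen l = true ↔
        ∃ k v idx, PySem.Set.contains seen k = false ∧
          pvA_findBoundary k l = some idx ∧ vd.get? k = some v ∧ pvPassAt segs v idx = true := by
  intro l
  induction l with
  | nil => intro seen; simp [pvB_scan, pvA_findBoundary]
  | cons p rest ih =>
    obtain ⟨i, b⟩ := p
    intro seen
    by_cases hs : PySem.Set.contains seen b = true
    · have hsm : b ∈ seen := by simpa [PySem.Set.contains] using hs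
      rw [show pvB_scan vd segs seen ((i, b) :: rest) = pvB_scan vd segs seen rest by
        simp [pvB_scan, hsm]]
      rw [ih seen]
      constructor
      · rintro ⟨k, v, idx, h1, h2, h3, h4⟩
        have hkb : k ≠ b := by rintro rfl; rw [hs] at h1; cases h1
        exact ⟨k, v, idx, h1, by simp [pvA_findBoundary, hkb, h2], h3, h4⟩
      · rintro ⟨k, v, idx, h1, h2, h3, h4⟩
        have hkb : k ≠ b := by rintro rfl; rw [hs] at h1; cases h1
        rw [show pvA_findBoundary k ((i, b) :: rest) = pvA_findBoundary k rest by
          simp [pvA_findBoundary, hkb]] at h2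
        exact ⟨k, v, idx, h1, h2, h3, h4⟩
    · have hsm : b ∉ seen := by simpa [PySem.Set.contains] using hs
      have hs' : PySem.Set.contains seen b = false := by simpa using hs
      cases hget : vd.get? b with
      | none =>
        rw [show pvB_scan vd segs seen ((i, b) :: rest) =
            pvB_scan vd segs (PySem.Set.add seen b) rest by
          simp [pvB_scan, hsm, hget]]
        rw [ih]
        constructor
        · rintro ⟨k, v, idx, h1, h2, h3, h4⟩
          rw [pvContains_add] at h1
          have hkb : k ≠ b := by intro hkb; simp [hkb] at h1
          have h1' : PySem.Set.contains seen k = false := by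
            rcases Bool.or_eq_false_iff.mp h1 with ⟨h1a, _⟩; exact h1a
          exact ⟨k, v, idx, h1', by simp [pvA_findBoundary, hkb, h2], h3, h4⟩
        · rintro ⟨k, v, idx, h1, h2, h3, h4⟩
          have hkb : k ≠ b := by rintro rfl; rw [hget] at h3; cases h3
          rw [show pvA_findBoundary k ((i, b) :: rest) = pvA_findBoundary k rest by
            simp [pvA_findBoundary, hkb]] at h2
          refine ⟨k, v, idx, ?_, h2, h3, h4⟩
          rw [pvContains_add, h1]
          simp [hkb]
      | some v0 =>
        by_cases hp : pvPassAt segs v0 i = true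
        · have hp' := hp
          simp only [pvPassAt, Bool.and_eq_true, Bool.not_eq_true',
            decide_eq_false_iff_not] at hp'
          obtain ⟨hp1, hp2a, hp2b⟩ := hp'
          have hp2a' : PySem.Chars.endswith (PySem.List.pyGetD segs i "").toList v0.toList
              = true := by simpa using hp2a
          have hp2b' : PySem.Chars.startswith (PySem.List.pyGetD segs (i + 1) "").toList
              v0.toList = true := by simpa using hp2b
          rw [show pvB_scan vd segs seen ((i, b) :: rest) = true by
            simp [pvB_scan, hsm, hget, hp1, hp2a', hp2b']]
          simp only [true_iff]
          exact ⟨b, v0, i, hs', by simp [pvA_findBoundary], hget, hp⟩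
        · have hstep : pvB_scan vd segs seen ((i, b) :: rest) =
              pvB_scan vd segs (PySem.Set.add seen b) rest := by
            by_cases hlen : (segs.length : Int) ≤ i + 1
            · simp [pvB_scan, hsm, hget, hlen]
            · have hes : (PySem.Chars.endswith (PySem.List.pyGetD segs i "").toList v0.toList &&
                  PySem.Chars.startswith (PySem.List.pyGetD segs (i + 1) "").toList v0.toList)
                  = false := by
                rw [Bool.eq_false_iff]
                intro hcon
                rw [Bool.and_eq_true] at hcon
                apply hp
                simp [pvPassAt, hlen, hcon.1, hcon.2]
              simp [pvB_scan, hsm, hget, hlen, hes]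
          rw [hstep, ih]
          constructor
          · rintro ⟨k, v, idx, h1, h2, h3, h4⟩
            rw [pvContains_add] at h1
            have hkb : k ≠ b := by intro hkb; simp [hkb] at h1
            have h1' : PySem.Set.contains seen k = false := by
              rcases Bool.or_eq_false_iff.mp h1 with ⟨h1a, _⟩; exact h1a
            exact ⟨k, v, idx, h1', by simp [pvA_findBoundary, hkb, h2], h3, h4⟩
          · rintro ⟨k, v, idx, h1, h2, h3, h4⟩
            by_cases hkb : k = b
            · subst hkb
              rw [show pvA_findBoundary k ((i, k) :: rest) = some i by
                simp [pvA_findBoundary]] at h2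
              rw [hget] at h3
              cases h2; cases h3
              exact absurd h4 hp
            · rw [show pvA_findBoundary k ((i, b) :: rest) = pvA_findBoundary k rest by
                simp [pvA_findBoundary, hkb]] at h2
              refine ⟨k, v, idx, ?_, h2, h3, h4⟩
              rw [pvContains_add, h1]
              simp [hkb]

theorem pvQual_len (joined : String) (op j1 j2 x y) (h : pvQual joined (op, j1, j2, x, y) = true) :
    PySem.Str.len (pvDel joined j1 j2) = 1 := by
  simp only [pvQual, Bool.and_eq_true, beq_iff_eq] at h
  exact h.2.1

set_option maxHeartbeats 1000000 in
theorem is_vowel_coalescence_py_spec : Claim_equal_is_vowel_coalescence_py := by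
  unfold Claim_equal_is_vowel_coalescence_py
  intro diff_ops boundaries segs joined word _hdom
  unfold Spec_is_vowel_coalescence_py
  simp only [is_vowel_coalescence_py, is_vowel_coalescence_py_alt]
  rw [pvA_char, Bool.eq_iff_iff, List.any_eq_true, pvB_char, pvIndexAux_eq]
  constructor
  · rintro ⟨⟨op, j1, j2, x, y⟩, hmem, hq⟩
    rw [Bool.and_eq_true] at hq
    obtain ⟨hq1, hq2⟩ := hq
    rw [pvPass] at hq2
    cases hf : pvA_findBoundary j1
        (PySem.List.enumerate (PySem.List.slice boundaries none (some (-1))) 0) with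
    | none => rw [hf] at hq2; cases hq2
    | some idx =>
      rw [hf] at hq2
      simp only [Bool.and_eq_true, Bool.not_eq_true', Bool.or_eq_false_iff,
        decide_eq_false_iff_not] at hq2
      obtain ⟨⟨hge0, hlt⟩, hes, hss⟩ := hq2
      obtain ⟨v, hget⟩ := pvIndex_complete joined diff_ops PySem.Dict.empty j1
        ⟨_, hmem, hq1, rfl⟩
      have hv : v = pvDel joined j1 j2 := by
        rcases pvIndex_sound joined diff_ops PySem.Dict.empty j1 v hget with
          ⟨t', ht', hq', hk', hd'⟩ | hemp
        · obtain ⟨op', j1', j2', x', y'⟩ := t'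
          simp only at hk' hd'
          have hlen' := pvQual_len joined op' j1' j2' x' y' hq'
          rw [hk'] at hlen' hd'
          rw [← hd']
          exact pvDel_det joined j1 j2' j2 hlen' (pvQual_len joined op j1 j2 x y hq1)
        · rw [PySem.Dict.get?_empty] at hemp; cases hemp
      refine ⟨j1, v, idx, rfl, hf, hget, ?_⟩
      have hes' : PySem.Chars.endswith (PySem.List.pyGetD segs idx "").toList
          (PySem.List.slice joined.toList (some j1) (some j2)) = true := by
        simpa [pvDel, PySem.Str.slice, PySem.Chars.slice, String.toList_ofList] using hes
      have hss' : PySem.Chars.startswith (PySem.List.pyGetD segs (idx + 1) "").toList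
          (PySem.List.slice joined.toList (some j1) (some j2)) = true := by
        simpa [pvDel, PySem.Str.slice, PySem.Chars.slice, String.toList_ofList] using hss
      simp [pvPassAt, hlt, hv, pvDel, hes', hss']
  · rintro ⟨k, v, idx, _h1, hf, hget, hp⟩
    rcases pvIndex_sound joined diff_ops PySem.Dict.empty k v hget with
      ⟨t', ht', hq', hk', hd'⟩ | hemp
    · refine ⟨t', ht', ?_⟩
      rw [Bool.and_eq_true]
      refine ⟨hq', ?_⟩
      rw [pvPass, hk', hf]
      have hge0 : (0 : Int) ≤ idx := pvFind_enum_ge k _ 0 idx hf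
      simp only [pvPassAt, Bool.and_eq_true, Bool.not_eq_true',
        decide_eq_false_iff_not] at hp
      obtain ⟨hlt, hes, hss⟩ := hp
      rw [hk'] at hd'
      have hes' : PySem.Chars.endswith (PySem.List.pyGetD segs idx "").toList v.toList = true := by
        simpa using hes
      have hss' : PySem.Chars.startswith (PySem.List.pyGetD segs (idx + 1) "").toList
          v.toList = true := by simpa using hss
      simp [hlt, hd', hes', hss', show ¬ (idx < 0) by omega]
    · rw [PySem.Dict.get?_empty] at hemp; cases hemp
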